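-- pv_equiv track=rewrite | github.com/dmoriart/band-review-website | scripts/irish_venues_scraper.py | determine_venue_type
-- ===== SOURCE A (Python) =====
-- from typing import Dict, List, Optional, Any, Union
--
-- def determine_venue_type(name: str, types: List[str]) -> str:
--     """Determine venue type based on name and Google types"""
--     name_lower = name.lower()
--
--     # Check Google types first
--     if 'night_club' in types:
--         return 'club'
--     elif 'bar' in types:
--         return 'pub'
--     elif 'restaurant' in types and any(music_word in name_lower for music_word in ['music', 'live', 'stage']):
--         return 'restaurant_with_music'
--
--     # Check name patterns
--     if any(word in name_lower for word in ['arena', 'stadium']):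
--         return 'arena'
--     elif any(word in name_lower for word in ['opera', 'theatre', 'theater']):
--         return 'theatre'
--     elif any(word in name_lower for word in ['hall', 'auditorium']):
--         return 'concert_hall'
--     elif any(word in name_lower for word in ['club', 'disco']):
--         return 'club'
--     elif any(word in name_lower for word in ['pub', 'bar', 'inn', 'tavern']):
--         return 'pub'
--     elif any(word in name_lower for word in ['center', 'centre', 'arts']):
--         return 'arts_center'
--     else:
--         return 'live_music'
-- ===== SOURCE B (Python) =====
-- from typing import List
--
-- # (keyword, priority) pairs; priority = index of the rule in A's if/elif chain
-- _KEYS = [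
--     ('arena', 0), ('stadium', 0),
--     ('opera', 1), ('theatre', 1), ('theater', 1),
--     ('hall', 2), ('auditorium', 2),
--     ('club', 3), ('disco', 3),
--     ('pub', 4), ('bar', 4), ('inn', 4), ('tavern', 4),
--     ('center', 5), ('centre', 5), ('arts', 5),
-- ]
-- _LABELS = ['arena', 'theatre', 'concert_hall', 'club', 'pub', 'arts_center', 'live_music']
--
--
-- def determine_venue_type(name: str, types: List[str]) -> str:
--     """Determine venue type based on name and Google types"""
--     name_lower = name.lower()
--
--     if 'night_club' in types:
--         return 'club'
--     if 'bar' in types: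
--         return 'pub'
--     if 'restaurant' in types and any(w in name_lower for w in ('music', 'live', 'stage')):
--         return 'restaurant_with_music'
--
--     # Single left-to-right scan of the name: at every position, see which
--     # keywords start there and keep the best (lowest) rule priority seen.
--     # The first rule of A's chain that matches is exactly the minimal
--     # priority of any keyword occurring anywhere in the name.
--     best = 6
--     for i in range(len(name_lower)):
--         for kw, p in _KEYS:
--             if p < best and name_lower.startswith(kw, i):
--                 best = p
--     return _LABELS[best]
-- ===== Notes on version B (the rewrite author's own statement) =====
-- stated objective: alternative
-- what changed: Instead of testing the six keyword groups one after another (each doing its own substring search over the whole name), B makes a single left-to-right scan over the name, at each position checking which keywords start there and keeping the minimal rule priority seen, then maps that priority to its label; the three types-based guards stay as guards.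
import Mathlib
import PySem

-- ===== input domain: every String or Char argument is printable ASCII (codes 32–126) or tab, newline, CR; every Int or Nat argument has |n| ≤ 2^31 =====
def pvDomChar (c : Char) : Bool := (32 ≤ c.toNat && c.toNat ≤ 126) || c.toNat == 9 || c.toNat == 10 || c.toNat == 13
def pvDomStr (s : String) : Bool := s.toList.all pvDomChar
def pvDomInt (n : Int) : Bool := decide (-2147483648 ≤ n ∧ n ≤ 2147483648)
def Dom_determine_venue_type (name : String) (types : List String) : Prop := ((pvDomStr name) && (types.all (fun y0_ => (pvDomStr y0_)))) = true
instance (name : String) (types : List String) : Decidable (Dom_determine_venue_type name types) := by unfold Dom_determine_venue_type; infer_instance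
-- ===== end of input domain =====

-- B replaces the per-rule substring tests with one left-to-right scan of the name keeping
-- the minimal matching rule priority (alternative algorithm; same behaviour).
-- ===== PORT A =====
def determine_venue_type (name : String) (types : List String) : String :=
  let name_lower := PySem.Str.lower name
  -- Check Google types first
  if types.contains "night_club" then "club"
  else if types.contains "bar" then "pub"
  else if types.contains "restaurant" &&
      (["music", "live", "stage"].any (fun w => PySem.Str.isIn w name_lower)) then
    "restaurant_with_music"
  -- Check name patterns
  else if ["arena", "stadium"].any (fun w => PySem.Str.isIn w name_lower) then "arena"
  else if ["opera", "theatre", "theater"].any (fun w => PySem.Str.isIn w name_lower) then "theatre"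
  else if ["hall", "auditorium"].any (fun w => PySem.Str.isIn w name_lower) then "concert_hall"
  else if ["club", "disco"].any (fun w => PySem.Str.isIn w name_lower) then "club"
  else if ["pub", "bar", "inn", "tavern"].any (fun w => PySem.Str.isIn w name_lower) then "pub"
  else if ["center", "centre", "arts"].any (fun w => PySem.Str.isIn w name_lower) then "arts_center"
  else "live_music"

-- ===== PORT B =====
-- (keyword, priority) pairs, as in Source B's _KEYS (keywords as char lists)
def pvKeys : List (List Char × Nat) :=
  [ ("arena".toList, 0), ("stadium".toList, 0),
    ("opera".toList, 1), ("theatre".toList, 1), ("theater".toList, 1),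
    ("hall".toList, 2), ("auditorium".toList, 2),
    ("club".toList, 3), ("disco".toList, 3),
    ("pub".toList, 4), ("bar".toList, 4), ("inn".toList, 4), ("tavern".toList, 4),
    ("center".toList, 5), ("centre".toList, 5), ("arts".toList, 5) ]

def pvLabels : List String :=
  ["arena", "theatre", "concert_hall", "club", "pub", "arts_center", "live_music"]

-- inner loop of Source B: over _KEYS, improve `best` when a keyword starts at the current position
def pvStep (s : List Char) (b : Nat) : Nat :=
  pvKeys.foldl (fun b kp => if kp.2 < b && PySem.Chars.startswith s kp.1 then kp.2 else b) b

-- outer loop of Source B: `for i in range(len(name_lower))`, scanned as successive suffixes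
def pvBest : List Char → Nat → Nat
  | [], b => b
  | c :: r, b => pvBest r (pvStep (c :: r) b)

def determine_venue_type_alt (name : String) (types : List String) : String :=
  let name_lower := PySem.Str.lower name
  if types.contains "night_club" then "club"
  else if types.contains "bar" then "pub"
  else if types.contains "restaurant" &&
      (["music", "live", "stage"].any (fun w => PySem.Str.isIn w name_lower)) then
    "restaurant_with_music"
  else pvLabels.getD (pvBest name_lower.toList 6) "live_music"

-- ===== PRECONDITION & SPEC =====
def Spec_determine_venue_type (name : String) (types : List String) (out : String) : Prop := out = determine_venue_type_alt name types
instance (name : String) (types : List String) (out : String) : Decidable (Spec_determine_venue_type name types out) := by unfold Spec_determine_venue_type; infer_instance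

-- ===== CLAIM (what is proved, stated in full; the proofs are below) =====
def Claim_equal_determine_venue_type : Prop := ∀ (name : String) (types : List String), Dom_determine_venue_type name types → Spec_determine_venue_type name types (determine_venue_type name types)

-- ===== LEMMAS AND PROOFS =====

-- proof-side: minimal priority of a keyword that is a PREFIX of s (6 if none)
def pvMinPre (s : List Char) (keys : List (List Char × Nat)) : Nat :=
  keys.foldr (fun kp m => if PySem.Chars.startswith s kp.1 then min kp.2 m else m) 6

-- proof-side: minimal priority of a keyword occurring anywhere in s (6 if none)
def pvMcur : List Char → Nat
  | [] => 6
  | c :: r => min (pvMinPre (c :: r) pvKeys) (pvMcur r)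

lemma pvMinPre_cons (s : List Char) (kp : List Char × Nat) (ks : List (List Char × Nat)) :
    pvMinPre s (kp :: ks)
      = if PySem.Chars.startswith s kp.1 then min kp.2 (pvMinPre s ks) else pvMinPre s ks := rfl

lemma pvStep_spec (keys : List (List Char × Nat)) (s : List Char) :
    ∀ b : Nat, b ≤ 6 →
      keys.foldl (fun b kp => if kp.2 < b && PySem.Chars.startswith s kp.1 then kp.2 else b) b
        = min b (pvMinPre s keys) := by
  induction keys with
  | nil => intro b hb; simp [pvMinPre]; omega
  | cons kp ks ih =>
    intro b hb
    rw [List.foldl_cons, pvMinPre_cons]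
    by_cases hpre : PySem.Chars.startswith s kp.1 = true
    · rw [if_pos hpre]
      by_cases hlt : kp.2 < b
      · rw [if_pos (by simp [Bool.and_eq_true, hlt, hpre]), ih kp.2 (by omega)]
        omega
      · rw [if_neg (by simp [Bool.and_eq_true, hlt]), ih b hb]
        omega
    · rw [if_neg hpre, if_neg (by simp [Bool.and_eq_true, hpre]), ih b hb]

lemma pvBest_spec (s : List Char) : ∀ b : Nat, b ≤ 6 → pvBest s b = min b (pvMcur s) := by
  induction s with
  | nil => intro b hb; simp [pvBest, pvMcur]; omega
  | cons c r ih =>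
    intro b hb
    simp only [pvBest, pvStep]
    rw [pvStep_spec pvKeys (c :: r) b hb]
    have h1 : min b (pvMinPre (c :: r) pvKeys) ≤ 6 := by omega
    rw [ih _ h1]
    simp only [pvMcur]
    omega

lemma pvMinPre_le_iff (s : List Char) (p : Nat) (hp : p < 6) :
    ∀ keys : List (List Char × Nat),
      (pvMinPre s keys ≤ p ↔ ∃ kp ∈ keys, kp.2 ≤ p ∧ kp.1 <+: s) := by
  intro keys
  induction keys with
  | nil => simp [pvMinPre]; omega
  | cons kp ks ih =>
    rw [pvMinPre_cons]
    by_cases hpre : PySem.Chars.startswith s kp.1 = true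
    · have hyp : kp.1 <+: s := (PySem.Chars.startswith_iff s kp.1).1 hpre
      rw [if_pos hpre]
      simp only [min_le_iff, List.mem_cons]
      rw [ih]
      constructor
      · rintro (h | ⟨x, hx, h⟩)
        · exact ⟨kp, Or.inl rfl, h, hyp⟩
        · exact ⟨x, Or.inr hx, h⟩
      · rintro ⟨x, hx, h⟩
        cases hx with
        | inl he => subst he; exact Or.inl h.1
        | inr hm => exact Or.inr ⟨x, hm, h⟩
    · have hnp : ¬ kp.1 <+: s := fun h => hpre ((PySem.Chars.startswith_iff s kp.1).2 h)
      rw [if_neg hpre, ih]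
      simp only [List.mem_cons]
      constructor
      · rintro ⟨x, hx, h⟩; exact ⟨x, Or.inr hx, h⟩
      · rintro ⟨x, hx, h⟩
        cases hx with
        | inl he => subst he; exact absurd h.2 hnp
        | inr hm => exact ⟨x, hm, h⟩

lemma pvMcur_le_iff (p : Nat) (hp : p < 6) :
    ∀ s : List Char, (pvMcur s ≤ p ↔ ∃ kp ∈ pvKeys, kp.2 ≤ p ∧ kp.1 <:+: s) := by
  intro s
  induction s with
  | nil =>
    simp only [pvMcur, List.infix_nil]
    constructor
    · omega
    · rintro ⟨kp, hkp, _, hnil⟩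
      exfalso
      revert hnil
      simp only [pvKeys, List.mem_cons, List.not_mem_nil, or_false] at hkp
      rcases hkp with h|h|h|h|h|h|h|h|h|h|h|h|h|h|h|h <;> subst h <;> decide
  | cons c r ih =>
    simp only [pvMcur, min_le_iff]
    rw [pvMinPre_le_iff (c :: r) p hp pvKeys, ih]
    constructor
    · rintro (⟨x, hx, h1, h2⟩ | ⟨x, hx, h1, h2⟩)
      · exact ⟨x, hx, h1, h2.isInfix⟩
      · exact ⟨x, hx, h1, h2.trans ((List.suffix_cons c r).isInfix)⟩
    · rintro ⟨x, hx, h1, h2⟩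
      rcases (List.infix_cons_iff).1 h2 with h | h
      · exact Or.inl ⟨x, hx, h1, h⟩
      · exact Or.inr ⟨x, hx, h1, h⟩

lemma pvMcur_le_six (s : List Char) : pvMcur s ≤ 6 := by
  induction s with
  | nil => simp [pvMcur]
  | cons c r ih => simp only [pvMcur]; omega

-- cumulative per-rule characterisations of pvMcur, in A's own condition shapes
lemma pvA0 (nl : String) : pvMcur nl.toList ≤ 0 ↔
    ((["arena", "stadium"].any (fun w => PySem.Str.isIn w nl)) = true) := by
  rw [pvMcur_le_iff 0 (by omega)]
  simp only [pvKeys, List.mem_cons, List.not_mem_nil, or_false, exists_eq_or_imp, exists_eq_left,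
    Nat.reduceLeDiff, true_and, false_and, false_or, List.any_cons, List.any_nil,
    Bool.or_eq_true, Bool.or_false, PySem.Str.isIn_iff_infix, or_assoc]

lemma pvA1 (nl : String) : pvMcur nl.toList ≤ 1 ↔
    ((["arena", "stadium"].any (fun w => PySem.Str.isIn w nl)) = true ∨
     (["opera", "theatre", "theater"].any (fun w => PySem.Str.isIn w nl)) = true) := by
  rw [pvMcur_le_iff 1 (by omega)]
  simp only [pvKeys, List.mem_cons, List.not_mem_nil, or_false, exists_eq_or_imp, exists_eq_left,
    Nat.reduceLeDiff, true_and, false_and, false_or, List.any_cons, List.any_nil,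
    Bool.or_eq_true, Bool.or_false, PySem.Str.isIn_iff_infix, or_assoc]

lemma pvA2 (nl : String) : pvMcur nl.toList ≤ 2 ↔
    ((["arena", "stadium"].any (fun w => PySem.Str.isIn w nl)) = true ∨
     (["opera", "theatre", "theater"].any (fun w => PySem.Str.isIn w nl)) = true ∨
     (["hall", "auditorium"].any (fun w => PySem.Str.isIn w nl)) = true) := by
  rw [pvMcur_le_iff 2 (by omega)]
  simp only [pvKeys, List.mem_cons, List.not_mem_nil, or_false, exists_eq_or_imp, exists_eq_left,
    Nat.reduceLeDiff, true_and, false_and, false_or, List.any_cons, List.any_nil,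
    Bool.or_eq_true, Bool.or_false, PySem.Str.isIn_iff_infix, or_assoc]

lemma pvA3 (nl : String) : pvMcur nl.toList ≤ 3 ↔
    ((["arena", "stadium"].any (fun w => PySem.Str.isIn w nl)) = true ∨
     (["opera", "theatre", "theater"].any (fun w => PySem.Str.isIn w nl)) = true ∨
     (["hall", "auditorium"].any (fun w => PySem.Str.isIn w nl)) = true ∨
     (["club", "disco"].any (fun w => PySem.Str.isIn w nl)) = true) := by
  rw [pvMcur_le_iff 3 (by omega)]
  simp only [pvKeys, List.mem_cons, List.not_mem_nil, or_false, exists_eq_or_imp, exists_eq_left,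
    Nat.reduceLeDiff, true_and, false_and, false_or, List.any_cons, List.any_nil,
    Bool.or_eq_true, Bool.or_false, PySem.Str.isIn_iff_infix, or_assoc]

lemma pvA4 (nl : String) : pvMcur nl.toList ≤ 4 ↔
    ((["arena", "stadium"].any (fun w => PySem.Str.isIn w nl)) = true ∨
     (["opera", "theatre", "theater"].any (fun w => PySem.Str.isIn w nl)) = true ∨
     (["hall", "auditorium"].any (fun w => PySem.Str.isIn w nl)) = true ∨
     (["club", "disco"].any (fun w => PySem.Str.isIn w nl)) = true ∨
     (["pub", "bar", "inn", "tavern"].any (fun w => PySem.Str.isIn w nl)) = true) := by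
  rw [pvMcur_le_iff 4 (by omega)]
  simp only [pvKeys, List.mem_cons, List.not_mem_nil, or_false, exists_eq_or_imp, exists_eq_left,
    Nat.reduceLeDiff, true_and, false_and, false_or, List.any_cons, List.any_nil,
    Bool.or_eq_true, Bool.or_false, PySem.Str.isIn_iff_infix, or_assoc]

lemma pvA5 (nl : String) : pvMcur nl.toList ≤ 5 ↔
    ((["arena", "stadium"].any (fun w => PySem.Str.isIn w nl)) = true ∨
     (["opera", "theatre", "theater"].any (fun w => PySem.Str.isIn w nl)) = true ∨
     (["hall", "auditorium"].any (fun w => PySem.Str.isIn w nl)) = true ∨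
     (["club", "disco"].any (fun w => PySem.Str.isIn w nl)) = true ∨
     (["pub", "bar", "inn", "tavern"].any (fun w => PySem.Str.isIn w nl)) = true ∨
     (["center", "centre", "arts"].any (fun w => PySem.Str.isIn w nl)) = true) := by
  rw [pvMcur_le_iff 5 (by omega)]
  simp only [pvKeys, List.mem_cons, List.not_mem_nil, or_false, exists_eq_or_imp, exists_eq_left,
    Nat.reduceLeDiff, true_and, false_and, false_or, List.any_cons, List.any_nil,
    Bool.or_eq_true, Bool.or_false, PySem.Str.isIn_iff_infix, or_assoc]

-- ===== VERDICT (by name: the statement is the Claim_ definition above) =====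
theorem determine_venue_type_spec : Claim_equal_determine_venue_type := by
  intro name types _
  unfold Spec_determine_venue_type
  simp only [determine_venue_type, determine_venue_type_alt]
  set nl := PySem.Str.lower name with hnl
  have h6 := pvMcur_le_six nl.toList
  rw [pvBest_spec nl.toList 6 (le_refl 6)]
  split_ifs with g1 g2 g3 c0 c1 c2 c3 c4 c5
  · rfl
  · rfl
  · rfl
  · have e : pvMcur nl.toList = 0 := by
      have := (pvA0 nl).2 c0; omega
    rw [e]; decide
  · have e : pvMcur nl.toList = 1 := by
      have hu := (pvA1 nl).2 (Or.inr c1)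
      have hl : ¬ pvMcur nl.toList ≤ 0 := fun h => c0 ((pvA0 nl).1 h)
      omega
    rw [e]; decide
  · have e : pvMcur nl.toList = 2 := by
      have hu := (pvA2 nl).2 (Or.inr (Or.inr c2))
      have hl : ¬ pvMcur nl.toList ≤ 1 := fun h => by
        rcases (pvA1 nl).1 h with h | h
        · exact c0 h
        · exact c1 h
      omega
    rw [e]; decide
  · have e : pvMcur nl.toList = 3 := by
      have hu := (pvA3 nl).2 (Or.inr (Or.inr (Or.inr c3)))
      have hl : ¬ pvMcur nl.toList ≤ 2 := fun h => by
        rcases (pvA2 nl).1 h with h | h | h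
        · exact c0 h
        · exact c1 h
        · exact c2 h
      omega
    rw [e]; decide
  · have e : pvMcur nl.toList = 4 := by
      have hu := (pvA4 nl).2 (Or.inr (Or.inr (Or.inr (Or.inr c4))))
      have hl : ¬ pvMcur nl.toList ≤ 3 := fun h => by
        rcases (pvA3 nl).1 h with h | h | h | h
        · exact c0 h
        · exact c1 h
        · exact c2 h
        · exact c3 h
      omega
    rw [e]; decide
  · have e : pvMcur nl.toList = 5 := by
      have hu := (pvA5 nl).2 (Or.inr (Or.inr (Or.inr (Or.inr (Or.inr c5)))))
      have hl : ¬ pvMcur nl.toList ≤ 4 := fun h => by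
        rcases (pvA4 nl).1 h with h | h | h | h | h
        · exact c0 h
        · exact c1 h
        · exact c2 h
        · exact c3 h
        · exact c4 h
      omega
    rw [e]; decide
  · have e : pvMcur nl.toList = 6 := by
      have hl : ¬ pvMcur nl.toList ≤ 5 := fun h => by
        rcases (pvA5 nl).1 h with h | h | h | h | h | h
        · exact c0 h
        · exact c1 h
        · exact c2 h
        · exact c3 h
        · exact c4 h
        · exact c5 h
      omega
    rw [e]; decide
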